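/- GENERATED by tools/from_farm_form.py from prooffarm-gif/accepted/GifFreeSavedImages.1/Proof.lean (a worked proof of the farm's unit `GifFreeSavedImages.1`,
   accepted by the verdict) — do not edit. -/
import Gif.Spec.Units.GifFreeSavedImages_1
import Gif.Spec.AllSegs

open X86 X86.User Asan ProgX.Base ProgX.Base.Spec Gif.Spec

set_option maxRecDepth 4000
set_option maxHeartbeats 4000000

/-!
  `GifFreeSavedImages.1` (0x107ee0 … 0x107f07, 12 instructions; gifalloc.c:431-438): from the function's entry to the loop head
  0x107f18 with no round done (`Head … 0`).

      entry ── test rdi, rdi ; je (dead: rdi = F.gif, a live object) ── push r12, rbp, rbx ── rbp = gif ── check ──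
            load gif.SavedImages (= s.arr) ── test rbx, rbx ; jne 107f18 (taken: s.arr is the base of a live object) ── HEAD

  The walker prunes both dead arms from the numeric ranges of `gif` and of the array (`Owns.inside`) and from the load stated as a
  fact (`l_saved`). Only stack was written (three pushes, the check's return address): the heap's invariant goes down to the new
  stack pointer (`HeapInv.sameExcept`, `.lower`), the shape and the reader's measure go through a loose stack window.
-/

/-- Segment 1 of `GifFreeSavedImages` reaches the loop head with `k = 0`. -/
theorem Gif.Spec.Proved.GifFreeSavedImages_1_ok : Gif.Spec.GifFreeSavedImages_1.Statement := by
  intro Lay hLay μ hμ u₀ hcode h_load8 H rest frames F R e ret he hpre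
  have he0 := he
  have hpre0 := hpre
  v_entry he
  obtain ⟨henv, hrdi, hsaved⟩ := hpre
  have hp := henv.heap
  have hok := henv.ok
  have hbase := hp.base
  have hlimit := hp.limit
  -- the array of the forest
  obtain ⟨s, hs⟩ : ∃ s, F.saved = some s := by
    cases hF : F.saved with
    | none => exact absurd hF hsaved
    | some s => exact ⟨s, rfl⟩
  -- where gif and the array are
  have hgin := hok.owns.inside hp.inv.heap (o := (F.gif, 120)) List.mem_cons_self
  have hain := hok.owns.inside hp.inv.heap (o := (s.arr, 56 * s.cap))
    (Forest.mem_owned_saved (by rw [hs]; exact List.mem_cons_self))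
  simp only at hgin hain
  rw [hbase] at hgin hain
  have hg1 := hgin.1
  have hg2 := hgin.2.2.2.2
  have ha1 := hain.1
  have ha2 := hain.2.2.2.2
  clear hgin hain
  -- the load of `gif.SavedImages`
  have hsv := hok.shape.saved
  rw [hs] at hsv
  have hsarr := hsv.1
  simp only [gfield] at hsarr
  have l_saved : e.mem.readLE (e.reg .rdi + 0x48) 8 = s.arr := by
    rw [rd_eq_readLE e.mem (e.reg .rdi + 0x48) (F.gif + 72) 8 (by u_omega)]
    exact hsarr
  -- 0x107ee0 … 0x107f00: the walk to the loop head (both early returns are pruned)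
  u_walk hcode [hμ.vendor] until [Gif.L.GifFreeSavedImages.loop1] span [ProgX.Base.L.textLo, ProgX.Base.L.textHi] side (v_side)
  case check_107ef4 =>
    -- 0x107ef4 (gifalloc.c:434): the load of `gif.SavedImages` lies inside the live 120-byte object `gif`
    have hun : ShadowUntouched e.mem s_107ef4.mem := by v_untouched
    have hl : LiveIn (H.liveObjs ++ rest) frames F.gif 120 := hok.gif_live.liveIn rest frames (Nat.le_refl _) (Nat.le_refl _)
    exact hl.accSmall hp.inv.shadow hun _ 8 (by decide) (by u_omega) (by u_omega)
  -- 0x107f18 (gifalloc.c:438): the loop head, no round done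
  have hun : ShadowUntouched e.mem s_107f00.mem := by v_untouched
  have hsame0 : Mem.SameExcept [⟨(e.reg .rsp).toNat - 112, (e.reg .rsp).toNat⟩] e.mem s_107f00.mem := by
    rw [w_mem]
    u_same
  have hcur := henv.ctx.cursor_range hp.inv.shadow
  have hplaced : Placed H F.owned := hok.owns.placed hp.inv.heap
  have hloose : ∀ w, w ∈ [(⟨(e.reg .rsp).toNat - 112, (e.reg .rsp).toNat⟩ : Span)] → Loose H F R w := by
    intro w hw
    have ew : w = ⟨(e.reg .rsp).toNat - 112, (e.reg .rsp).toNat⟩ := List.mem_singleton.mp hw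
    subst ew
    exact Loose.stack hp.inv.heap (by simp only; omega) (by simp only; omega) (by simp only; omega)
  have hwin : ∀ w, w ∈ [(⟨(e.reg .rsp).toNat - 112, (e.reg .rsp).toNat⟩ : Span)] → HeapWin H w := by
    intro w hw
    have ew : w = ⟨(e.reg .rsp).toNat - 112, (e.reg .rsp).toNat⟩ := List.mem_singleton.mp hw
    subst ew
    apply HeapWin.offHeap hp.inv.heap
    left
    simp only
    omega
  have hloop : GifFreeSavedImages.Loop Gif.L.GifFreeSavedImages.at_107f18 H rest frames F R s 0 u₀ e ret s_107f00 := {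
    entry := he0
    pre := hpre0
    saved := hs
    le := Nat.zero_le _
    rip := w_rip
    rsp := w_rsp
    rbp := w_rbp
    r13 := w_kept.get .r13 rfl
    r14 := w_kept.get .r14 rfl
    r15 := w_kept.get .r15 rfl
    slot_r12 := by
      rw [w_mem]
      u_read
    slot_rbp := by
      rw [w_mem]
      u_read
    slot_rbx := by
      rw [w_mem]
      u_read
    slot_ra := by
      u_frame he_retAddr
    inv := by
      rw [GifFreeSavedImages.heapAt_zero]
      exact (hp.inv.sameExcept hun hsame0 hwin).lower (by omega) (by omega) (by omega)
    owns := by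
      rw [GifFreeSavedImages.heapAt_zero]
      exact hok.owns.perm (GifFreeSavedImages.liveAt_zero F s hs)
    placed := by
      rw [GifFreeSavedImages.heapAt_zero]
      exact hplaced
    shape := by
      rw [GifFreeSavedImages.forestAt_zero F s hs]
      exact hok.shape.sameExcept hplaced hp.inv.heap ⟨hcur.1, hcur.2.1⟩ hsame0 hloose
    rem := by
      apply rem_sameExcept hsame0 (by omega)
      intro w hw
      have ew : w = ⟨(e.reg .rsp).toNat - 112, (e.reg .rsp).toNat⟩ := List.mem_singleton.mp hw
      subst ew
      simp only
      omega
    same := by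
      rw [w_mem]
      u_same
    code := ProgX.Base.conv_code_in w_eq
    abi := by
      refine ProgX.Base.abiInv_of ?_ ?_
      · rw [w_flags]
        simp only [X86.User.df_setStatus]
        exact w_df_107ef4
      · rw [w_mxcsr]
        exact he_mx
  }
  refine ReachVia.done ⟨s, ?_⟩
  exact {
    loop := hloop
    rbx := by
      rw [w_rbx, toNat_ofNat_addr s.arr (by omega)]
      omega
  }
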